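-- pv_equiv track=rewrite | github.com/lucascouto/operators-rates | teste.py | find_corresponding_prefixes
-- ===== SOURCE A (Python) =====
-- def find_corresponding_prefixes(all_operators, phone_number):
--
--     prefixes_list = list()
--     phone_number_digits = [int(digit) for digit in str(phone_number)]
--
--     for operator in all_operators:
--
--         max_prefix_length = 0
--         current_prefix = 0
--
--         for prefix in list(operator[1].keys()):
--
--             prefix_digits = [int(digit) for digit in str(prefix)]
--             is_valid_prefix = True
--
--
--             for i in range(len(prefix_digits)):
--                 if prefix_digits[i] != phone_number_digits[i]:
--                     is_valid_prefix = False
--                     break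
--
--             if is_valid_prefix and len(prefix_digits) > max_prefix_length:
--                 max_prefix_length = len(prefix_digits)
--                 current_prefix = prefix
--
--
--         if current_prefix != 0:
--             current_value = operator[1][current_prefix]
--             operator_name = operator[0]
--             prefixes_list.append((current_value, operator_name, current_prefix))
--
--     return prefixes_list
-- ===== SOURCE B (Python) =====
-- def find_corresponding_prefixes(all_operators, phone_number):
--     # Candidate prefixes of the phone number, longest first: n, n//10, ..., leading digit.
--     cands = []
--     p = phone_number
--     for _ in str(phone_number):
--         cands.append(p)
--         p //= 10
--     result = []
--     for name, prefixes in all_operators: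
--         for c in cands:
--             if c in prefixes:
--                 result.append((prefixes[c], name, c))
--                 break
--     return result
-- ===== Notes on version B (the rewrite author's own statement) =====
-- stated objective: faster
-- what changed: Instead of re-stringifying every prefix key and digit-comparing it against the phone number (O(operators x keys x digits)), B generates the phone number's own leading prefixes by repeated integer division (longest first) and looks each up in the operator's dict, so the per-operator scan over all keys disappears (O(operators x digits) dict lookups).
-- intended difference: On phone number 0 with 0 among an operator's prefix keys, A's 'if current_prefix != 0' sentinel silently drops the matched prefix 0 and returns [] while B returns that operator's entry (value, name, 0), the intended value since 0 is a genuinely matching prefix of '0'. — e.g. on find_corresponding_prefixes([("op", [(0, 7)])], 0): A returns [], B returns [(7, "op", 0)]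
import Mathlib
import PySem

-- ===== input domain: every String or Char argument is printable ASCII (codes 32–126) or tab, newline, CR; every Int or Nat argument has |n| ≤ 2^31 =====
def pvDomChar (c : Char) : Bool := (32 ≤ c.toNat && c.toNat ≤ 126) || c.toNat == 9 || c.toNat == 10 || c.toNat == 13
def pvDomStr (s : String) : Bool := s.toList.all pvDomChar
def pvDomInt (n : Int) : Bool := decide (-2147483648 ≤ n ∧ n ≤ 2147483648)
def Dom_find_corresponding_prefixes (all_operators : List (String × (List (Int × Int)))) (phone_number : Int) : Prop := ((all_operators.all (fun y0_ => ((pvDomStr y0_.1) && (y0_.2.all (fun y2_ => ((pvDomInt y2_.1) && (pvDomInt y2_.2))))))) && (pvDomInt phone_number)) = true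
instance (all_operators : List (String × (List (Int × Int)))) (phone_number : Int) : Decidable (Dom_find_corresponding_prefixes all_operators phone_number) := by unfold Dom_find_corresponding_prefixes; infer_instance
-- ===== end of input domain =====

-- B replaces A's per-operator scan over ALL prefix keys (re-stringifying and digit-comparing each key)
-- by dict lookups of the phone number's own leading prefixes, longest first: O(operators × digits).
-- A raises (ValueError/IndexError) on negative inputs and on keys strictly extending the phone number; Pre_ excludes those.

-- ===== PORT A =====
-- [int(digit) for digit in str(n)]; exact for n ≥ 0 (Pre_): Python raises ValueError on the '-' of a negative n.
def pvIntDigits (n : Int) : List Int :=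
  (PySem.Int.toChars n).map (fun c => ((c.toNat : Int) - 48))

-- the inner 'for i in range(len(prefix_digits))' loop with its break; the (_ :: _, []) case is where
-- Python raises IndexError (prefix strictly extends the phone number) — excluded by Pre_.
def pvIsValidPrefix : List Int → List Int → Bool
  | [], _ => true
  | _ :: _, [] => false
  | p :: ps, q :: qs => if p ≠ q then false else pvIsValidPrefix ps qs

-- the per-operator loop over list(operator[1].keys()) maintaining (max_prefix_length, current_prefix)
def pvBestPrefix (phd : List Int) (ks : List Int) : Nat × Int :=
  ks.foldl (fun st p =>
    let pd := pvIntDigits p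
    if pvIsValidPrefix pd phd = true ∧ st.1 < pd.length then (pd.length, p) else st) (0, 0)

def find_corresponding_prefixes (all_operators : List (String × (List (Int × Int)))) (phone_number : Int) : List (Int × String × Int) :=
  let phd := pvIntDigits phone_number
  all_operators.foldl (fun acc op =>
    let d : PySem.Dict Int Int := PySem.Dict.ofList op.2
    let best := pvBestPrefix phd d.keys
    -- operator[1][current_prefix]: current_prefix is a key here, so getD is exact (no KeyError)
    if best.2 ≠ 0 then acc ++ [(d.getD best.2 0, op.1, best.2)] else acc) []

-- ===== PORT B =====
-- 'for _ in str(phone_number): cands.append(p); p //= 10'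
def pvCandsB (phone : Int) : List Int :=
  ((PySem.Int.toChars phone).foldl
    (fun (st : List Int × Int) _ => (st.1 ++ [st.2], PySem.Int.floordiv st.2 10))
    (([] : List Int), phone)).1

-- 'for c in cands: if c in prefixes: result.append((prefixes[c], name, c)); break'
def pvFirstMatch (d : PySem.Dict Int Int) (name : String) : List Int → Option (Int × String × Int)
  | [] => none
  | c :: cs =>
    match d.get? c with
    | some v => some (v, name, c)
    | none => pvFirstMatch d name cs

def find_corresponding_prefixes_alt (all_operators : List (String × (List (Int × Int)))) (phone_number : Int) : List (Int × String × Int) :=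
  let cands := pvCandsB phone_number
  all_operators.foldl (fun acc op =>
    match pvFirstMatch (PySem.Dict.ofList op.2) op.1 cands with
    | some t => acc ++ [t]
    | none => acc) []

-- ===== PRECONDITION & SPEC =====
-- number of decimal digits of str(n) for n ≥ 0
def pvNumLen (n : Nat) : Nat := max 1 (Nat.digits 10 n).length

-- Pre_ excludes exactly the inputs where Python A raises: a negative phone number or a negative prefix key
-- (ValueError in int(digit)), or a prefix key whose decimal string strictly extends the phone number's
-- (IndexError in phone_number_digits[i]).
def Pre_find_corresponding_prefixes (all_operators : List (String × (List (Int × Int)))) (phone_number : Int) : Prop :=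
  0 ≤ phone_number ∧
  ∀ op ∈ all_operators, ∀ pr ∈ op.2, 0 ≤ pr.1 ∧
    ¬ (pvNumLen phone_number.toNat < pvNumLen pr.1.toNat ∧
       pr.1.toNat / 10 ^ (pvNumLen pr.1.toNat - pvNumLen phone_number.toNat) = phone_number.toNat)
instance (all_operators : List (String × (List (Int × Int)))) (phone_number : Int) : Decidable (Pre_find_corresponding_prefixes all_operators phone_number) := by unfold Pre_find_corresponding_prefixes; infer_instance

def pvWitness_find_corresponding_prefixes : (List (String × (List (Int × Int)))) × Int :=
  ([("op", [(12, 3)])], 125)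

-- On phone number 0 with 0 among an operator's prefix keys, A's sentinel 'if current_prefix != 0' silently
-- drops the matched prefix 0 and A returns [], while B returns that operator's entry for prefix 0, which is
-- the intended value (0 is a matching prefix of '0' like any other).
def D_find_corresponding_prefixes (all_operators : List (String × (List (Int × Int)))) (phone_number : Int) : Prop :=
  phone_number = 0 ∧ ∃ op ∈ all_operators, ∃ pr ∈ op.2, pr.1 = 0
instance (all_operators : List (String × (List (Int × Int)))) (phone_number : Int) : Decidable (D_find_corresponding_prefixes all_operators phone_number) := by unfold D_find_corresponding_prefixes; infer_instance

def Spec_find_corresponding_prefixes (all_operators : List (String × (List (Int × Int)))) (phone_number : Int) (out : List (Int × String × Int)) : Prop :=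
  ¬ D_find_corresponding_prefixes all_operators phone_number → out = find_corresponding_prefixes_alt all_operators phone_number
instance (all_operators : List (String × (List (Int × Int)))) (phone_number : Int) (out : List (Int × String × Int)) : Decidable (Spec_find_corresponding_prefixes all_operators phone_number out) := by unfold Spec_find_corresponding_prefixes; infer_instance

def pvDiffWitness_find_corresponding_prefixes : (List (String × (List (Int × Int)))) × Int :=
  ([("op", [(0, 7)])], 0)
def pvDiffWitnessOut_find_corresponding_prefixes : (List (Int × String × Int)) × (List (Int × String × Int)) :=
  ([], [(7, "op", 0)])

-- ===== CLAIM (what is proved, stated in full; the proofs are below) =====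
def Claim_unchanged_find_corresponding_prefixes : Prop := ∀ (all_operators : List (String × (List (Int × Int)))) (phone_number : Int), Dom_find_corresponding_prefixes all_operators phone_number → Pre_find_corresponding_prefixes all_operators phone_number → Spec_find_corresponding_prefixes all_operators phone_number (find_corresponding_prefixes all_operators phone_number)
def Claim_changed_find_corresponding_prefixes : Prop := Dom_find_corresponding_prefixes (pvDiffWitness_find_corresponding_prefixes.1) (pvDiffWitness_find_corresponding_prefixes.2) ∧ Pre_find_corresponding_prefixes (pvDiffWitness_find_corresponding_prefixes.1) (pvDiffWitness_find_corresponding_prefixes.2) ∧ D_find_corresponding_prefixes (pvDiffWitness_find_corresponding_prefixes.1) (pvDiffWitness_find_corresponding_prefixes.2) ∧ find_corresponding_prefixes (pvDiffWitness_find_corresponding_prefixes.1) (pvDiffWitness_find_corresponding_prefixes.2) = pvDiffWitnessOut_find_corresponding_prefixes.1 ∧ find_corresponding_prefixes_alt (pvDiffWitness_find_corresponding_prefixes.1) (pvDiffWitness_find_corresponding_prefixes.2) = pvDiffWitnessOut_find_corresponding_prefixes.2 ∧ pvDiffWitnessOut_find_corresponding_prefixes.1 ≠ pvDiffWitnessO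ut_find_corresponding_prefixes.2
def Claim_exact_find_corresponding_prefixes : Prop := ∀ (all_operators : List (String × (List (Int × Int)))) (phone_number : Int), Dom_find_corresponding_prefixes all_operators phone_number → Pre_find_corresponding_prefixes all_operators phone_number → D_find_corresponding_prefixes all_operators phone_number → find_corresponding_prefixes all_operators phone_number ≠ find_corresponding_prefixes_alt all_operators phone_number

-- ===== LEMMAS AND PROOFS =====

theorem pv_toDigitsCore_eq (f : Nat) : ∀ (n : Nat) (l : List Char), n ≠ 0 → n < f →
    Nat.toDigitsCore 10 f n l = ((Nat.digits 10 n).map Nat.digitChar).reverse ++ l := by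
  induction f with
  | zero => intro n l hn hf; omega
  | succ f ih =>
    intro n l hn hf
    rw [Nat.toDigitsCore, Nat.digits_def' (by norm_num : (1:Nat) < 10) (Nat.pos_of_ne_zero hn)]
    by_cases h : n / 10 = 0
    · rw [if_pos h, h]
      simp
    · rw [if_neg h, ih (n/10) _ h (by omega)]
      simp

theorem pv_toDigits_eq (n : Nat) (hn : n ≠ 0) :
    Nat.toDigits 10 n = ((Nat.digits 10 n).map Nat.digitChar).reverse := by
  rw [Nat.toDigits, pv_toDigitsCore_eq (n+1) n [] hn (by omega)]; simp

theorem pvIntDigits_natCast (n : Nat) (hn : n ≠ 0) :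
    pvIntDigits (n : Int) = (List.map (fun d : Nat => (d : Int)) (Nat.digits 10 n)).reverse := by
  have h10 : ∀ d ∈ Nat.digits 10 n, d < 10 := fun d hd => Nat.digits_lt_base (by norm_num) hd
  rw [pvIntDigits, PySem.Int.toChars]
  rw [if_neg (by omega), Int.toNat_natCast, pv_toDigits_eq n hn]
  rw [List.map_reverse, List.map_map]
  congr 1
  apply List.map_congr_left
  intro d hd
  have := h10 d hd
  interval_cases d <;> decide

theorem pvIntDigits_len (n : Nat) : (pvIntDigits (n : Int)).length = pvNumLen n := by
  rcases eq_or_ne n 0 with rfl | hn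
  · decide
  · rw [pvIntDigits_natCast n hn, pvNumLen]
    simp [Nat.max_eq_right (List.length_pos_of_ne_nil (Nat.digits_ne_nil_iff_ne_zero.mpr hn))]

theorem pvIsValidPrefix_iff (l m : List Int) : pvIsValidPrefix l m = true ↔ l <+: m := by
  induction l generalizing m with
  | nil => simp [pvIsValidPrefix]
  | cons a l ih =>
    cases m with
    | nil => simp [pvIsValidPrefix]
    | cons b m =>
      rw [pvIsValidPrefix]
      by_cases hab : a = b
      · subst hab; simp [ih, List.cons_prefix_cons]
      · simp [hab, List.cons_prefix_cons]

theorem pv_digits_div10 (x : Nat) : Nat.digits 10 (x / 10) = (Nat.digits 10 x).tail := by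
  rcases Nat.eq_zero_or_pos x with h | h
  · simp [h]
  · rw [Nat.digits_def' (by norm_num : (1:Nat) < 10) h]; rfl

theorem pv_digits_div_pow (x j : Nat) : Nat.digits 10 (x / 10 ^ j) = (Nat.digits 10 x).drop j := by
  induction j generalizing x with
  | zero => simp
  | succ j ih =>
    rw [pow_succ, ← Nat.div_div_eq_div_mul, pv_digits_div10, ih, List.tail_drop]

theorem pvNumLen_div_pow (q j : Nat) (hj : j < pvNumLen q) (hq : q ≠ 0) :
    pvNumLen (q / 10 ^ j) = pvNumLen q - j := by
  have hlen : 1 ≤ (Nat.digits 10 q).length :=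
    List.length_pos_of_ne_nil (Nat.digits_ne_nil_iff_ne_zero.mpr hq)
  have hL : pvNumLen q = (Nat.digits 10 q).length := by rw [pvNumLen]; omega
  rw [hL] at hj
  rw [pvNumLen, pv_digits_div_pow, List.length_drop, hL]
  omega

theorem pv_div_pow_ne_zero (q j : Nat) (hj : j < pvNumLen q) (hq : q ≠ 0) : q / 10 ^ j ≠ 0 := by
  have hL : pvNumLen q = (Nat.digits 10 q).length := by
    have : 1 ≤ (Nat.digits 10 q).length :=
      List.length_pos_of_ne_nil (Nat.digits_ne_nil_iff_ne_zero.mpr hq)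
    rw [pvNumLen]; omega
  rw [hL] at hj
  intro h0
  have hlt : q < 10 ^ j := by
    rcases Nat.div_eq_zero_iff.mp h0 with h | h
    · exact absurd h (pow_ne_zero j (by norm_num))
    · exact h
  have h1 : 10 ^ (Nat.digits 10 q).length ≤ 10 * q :=
    Nat.base_pow_length_digits_le 10 q (by norm_num) hq
  have h2 : 10 ^ j ≤ 10 ^ ((Nat.digits 10 q).length - 1) :=
    Nat.pow_le_pow_right (by norm_num) (by omega)
  have h3 : 10 * 10 ^ ((Nat.digits 10 q).length - 1) = 10 ^ (Nat.digits 10 q).length := by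
    rw [← pow_succ']
    congr 1
    omega
  rw [← h3] at h1
  have h5 := Nat.le_of_mul_le_mul_left h1 (by norm_num)
  exact absurd (lt_of_lt_of_le hlt (le_trans h2 h5)) (lt_irrefl q)

theorem pv_match_iff (p q : Nat) (hp : p ≠ 0) (hq : q ≠ 0) :
    pvIntDigits (p : Int) <+: pvIntDigits (q : Int) ↔ ∃ j < pvNumLen q, p = q / 10 ^ j := by
  have hcast : Function.Injective (fun d : Nat => (d : Int)) := fun a b h => by simpa using h
  rw [pvIntDigits_natCast p hp, pvIntDigits_natCast q hq]
  rw [List.reverse_prefix]  -- check name: reverse l <+: reverse m ↔ l <:+ m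
  have hLq : pvNumLen q = (Nat.digits 10 q).length := by
    have : 1 ≤ (Nat.digits 10 q).length :=
      List.length_pos_of_ne_nil (Nat.digits_ne_nil_iff_ne_zero.mpr hq)
    rw [pvNumLen]; omega
  have hLp : 1 ≤ (Nat.digits 10 p).length :=
    List.length_pos_of_ne_nil (Nat.digits_ne_nil_iff_ne_zero.mpr hp)
  constructor
  · intro h
    have hlen := h.length_le
    simp only [List.length_map] at hlen
    have heq := List.suffix_iff_eq_drop.mp h
    rw [← List.map_drop] at heq
    have hdig : Nat.digits 10 p
        = (Nat.digits 10 q).drop ((List.map (fun d : Nat => (d : Int)) (Nat.digits 10 q)).length - (List.map (fun d : Nat => (d : Int)) (Nat.digits 10 p)).length) :=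
      List.map_injective_iff.mpr hcast heq
    simp only [List.length_map] at hdig
    refine ⟨(Nat.digits 10 q).length - (Nat.digits 10 p).length, by omega, ?_⟩
    rw [← pv_digits_div_pow] at hdig
    exact Nat.digits_inj_iff.mp hdig
  · rintro ⟨j, hj, rfl⟩
    rw [pv_digits_div_pow, List.map_drop]
    exact List.drop_suffix _ _

theorem pv_match_zero_left (q : Nat) (hq : q ≠ 0) :
    ¬ (pvIntDigits 0 <+: pvIntDigits (q : Int)) := by
  have h0 : pvIntDigits 0 = [0] := by decide
  rw [h0, pvIntDigits_natCast q hq]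
  intro h
  have hnil : Nat.digits 10 q ≠ [] := Nat.digits_ne_nil_iff_ne_zero.mpr hq
  have hlast := Nat.getLast_digit_ne_zero 10 hq
  obtain ⟨t, ht⟩ := h
  have hh : (List.map (fun d : Nat => (d : Int)) (Nat.digits 10 q)).reverse.head? = some 0 := by
    rw [← ht]; rfl
  rw [List.head?_reverse, List.getLast?_map] at hh
  rw [List.getLast?_eq_some_getLast hnil] at hh
  simp only [Option.map_some] at hh
  have : ((Nat.digits 10 q).getLast hnil : Int) = 0 := by exact_mod_cast Option.some.inj hh
  exact hlast (by exact_mod_cast this)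

theorem pv_match_zero_right (p : Nat) : pvIntDigits (p : Int) <+: pvIntDigits 0 ↔ p = 0 := by
  constructor
  · intro h
    by_contra hp
    have := pvIntDigits_len p
    have hlen := h.length_le
    have h0 : pvIntDigits 0 = [0] := by decide
    rw [h0] at h hlen
    have hlp : (pvIntDigits (p : Int)).length = pvNumLen p := pvIntDigits_len p
    have hge : 1 ≤ pvNumLen p := by rw [pvNumLen]; omega
    have heq : pvIntDigits (p : Int) = [0] := by
      apply h.eq_of_length
      rw [hlp] at hlen ⊢
      simp only [List.length_cons, List.length_nil] at hlen ⊢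
      omega
    have hnil : Nat.digits 10 p ≠ [] := Nat.digits_ne_nil_iff_ne_zero.mpr hp
    have hlast := Nat.getLast_digit_ne_zero 10 hp
    rw [pvIntDigits_natCast p hp] at heq
    have hh : (List.map (fun d : Nat => (d : Int)) (Nat.digits 10 p)).reverse.head? = some 0 := by
      rw [heq]; rfl
    rw [List.head?_reverse, List.getLast?_map] at hh
    rw [List.getLast?_eq_some_getLast hnil] at hh
    simp only [Option.map_some] at hh
    have : ((Nat.digits 10 p).getLast hnil : Int) = 0 := by exact_mod_cast Option.some.inj hh
    exact hlast (by exact_mod_cast this)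
  · rintro rfl; exact List.prefix_refl _

theorem pv_div_pow_inj (q : Nat) (hq : q ≠ 0) {j j' : Nat} (hj : j < pvNumLen q)
    (hj' : j' < pvNumLen q) (h : q / 10 ^ j = q / 10 ^ j') : j = j' := by
  have h1 := pvNumLen_div_pow q j hj hq
  have h2 := pvNumLen_div_pow q j' hj' hq
  rw [h] at h1
  omega

theorem pvCandsB_foldl (cs : List Char) : ∀ (acc : List Int) (m : Nat),
    (cs.foldl (fun (st : List Int × Int) _ => (st.1 ++ [st.2], PySem.Int.floordiv st.2 10)) (acc, (m : Int)))
      = (acc ++ (List.range cs.length).map (fun j => ((m / 10 ^ j : Nat) : Int)), ((m / 10 ^ cs.length : Nat) : Int)) := by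
  induction cs with
  | nil => intro acc m; simp
  | cons c cs ih =>
    intro acc m
    rw [List.foldl_cons]
    have hfd : PySem.Int.floordiv (m : Int) 10 = ((m / 10 : Nat) : Int) := by
      have := PySem.Int.floordiv_natCast m 10
      exact_mod_cast this
    rw [hfd, ih]
    have hx : ∀ j, m / 10 / 10 ^ j = m / 10 ^ (j+1) := by
      intro j; rw [Nat.div_div_eq_div_mul, pow_succ']
    rw [Prod.mk.injEq]
    constructor
    · simp only [List.length_cons, List.range_succ_eq_map, List.map_cons, List.map_map]
      simp only [hx, pow_zero, Nat.div_one]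
      simp
    · simp only [List.length_cons, hx]

theorem pvCandsB_natCast (q : Nat) :
    pvCandsB (q : Int) = (List.range (max 1 (Nat.digits 10 q).length)).map (fun j => ((q / 10 ^ j : Nat) : Int)) := by
  have hlen : (PySem.Int.toChars (q : Int)).length = max 1 (Nat.digits 10 q).length := by
    rcases eq_or_ne q 0 with rfl | hq
    · decide
    · rw [PySem.Int.toChars, if_neg (by omega), Int.toNat_natCast, pv_toDigits_eq q hq]
      simp [Nat.max_eq_right (List.length_pos_of_ne_nil (Nat.digits_ne_nil_iff_ne_zero.mpr hq))]
  rw [pvCandsB, pvCandsB_foldl, hlen]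
  simp

theorem pvFirstMatch_map (d : PySem.Dict Int Int) (name : String) (f : Nat → Int) (js : List Nat) :
    pvFirstMatch d name (js.map f)
      = (js.find? (fun j => (d.get? (f j)).isSome)).map (fun j => (d.getD (f j) 0, name, f j)) := by
  induction js with
  | nil => rfl
  | cons j js ih =>
    rw [List.map_cons, pvFirstMatch, List.find?_cons]
    cases hg : d.get? (f j) with
    | some v =>
      simp only [Option.isSome_some, Option.map_some]
      simp [PySem.Dict.getD_eq_get?_getD, hg]
    | none =>
      simp only [Option.isSome_none]
      exact ih

theorem pv_find?_range_min {p : Nat → Bool} {L j : Nat} (h : (List.range L).find? p = some j) :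
    p j = true ∧ j < L ∧ ∀ i < j, p i = false := by
  induction L with
  | zero => simp at h
  | succ L ih =>
    rw [List.range_succ, List.find?_append] at h
    cases hf : (List.range L).find? p with
    | some j' =>
      rw [hf] at h
      rw [Option.some_or] at h
      obtain ⟨h1, h2, h3⟩ := ih (by rw [hf, h])
      exact ⟨h1, by omega, h3⟩
    | none =>
      rw [hf] at h
      have hnone := List.find?_eq_none.mp hf
      rw [Option.none_or] at h
      rw [List.find?_cons] at h
      cases hp : p L with
      | true =>
        rw [hp] at h
        simp at h
        subst h
        exact ⟨hp, by omega, fun i hi => by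
          have := hnone i (by simp [List.mem_range]; omega)
          simpa using this⟩
      | false => rw [hp] at h; simp at h

def pvToJ (q : Nat) (p : Int) : Option Nat :=
  (List.range (pvNumLen q)).find? (fun j => p == ((q / 10 ^ j : Nat) : Int))

theorem pvToJ_eq_some_iff (q : Nat) (hq : q ≠ 0) (p : Int) (j : Nat) :
    pvToJ q p = some j ↔ j < pvNumLen q ∧ p = ((q / 10 ^ j : Nat) : Int) := by
  constructor
  · intro h
    have hmem := List.mem_range.mp (List.mem_of_find?_eq_some h)
    have hp := List.find?_some h
    exact ⟨hmem, by simpa using hp⟩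
  · rintro ⟨hj, rfl⟩
    cases hf : pvToJ q (((q / 10 ^ j : Nat) : Int)) with
    | none =>
      exfalso
      have := List.find?_eq_none.mp hf j (List.mem_range.mpr hj)
      simp at this
    | some j' =>
      have hmem := List.mem_range.mp (List.mem_of_find?_eq_some hf)
      have hp := List.find?_some hf
      have hcast : ((q / 10 ^ j : Nat) : Int) = ((q / 10 ^ j' : Nat) : Int) := by simpa using hp
      have : q / 10 ^ j = q / 10 ^ j' := by exact_mod_cast hcast
      rw [pv_div_pow_inj q hq hj hmem this]

def pvEnc (q : Nat) : Option Nat → Nat × Int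
  | none => (0, 0)
  | some j => (pvNumLen q - j, ((q / 10 ^ j : Nat) : Int))

def pvJStep (q : Nat) (acc : Option Nat) (p : Int) : Option Nat :=
  match pvToJ q p with
  | none => acc
  | some jp => match acc with | none => some jp | some j => some (min j jp)

def pvStep (q : Nat) (st : Nat × Int) (p : Int) : Nat × Int :=
  let pd := pvIntDigits p
  if pvIsValidPrefix pd (pvIntDigits (q : Int)) = true ∧ st.1 < pd.length then (pd.length, p) else st

theorem pvStep_enc (q : Nat) (hq : q ≠ 0) (p : Int) (hp : 0 ≤ p) (jo : Option Nat)
    (hjo : ∀ j ∈ jo, j < pvNumLen q) :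
    pvStep q (pvEnc q jo) p = pvEnc q (pvJStep q jo p) ∧ ∀ j ∈ pvJStep q jo p, j < pvNumLen q := by
  cases htj : pvToJ q p with
  | none =>
    have hvalid : pvIsValidPrefix (pvIntDigits p) (pvIntDigits (q : Int)) = false := by
      by_contra hv
      have hv' : pvIsValidPrefix (pvIntDigits p) (pvIntDigits (q : Int)) = true := by
        cases h : pvIsValidPrefix (pvIntDigits p) (pvIntDigits (q : Int)) with
        | true => rfl
        | false => exact absurd h hv
      have hpre := (pvIsValidPrefix_iff _ _).mp hv'
      have hpn : p = ((p.toNat : Nat) : Int) := by omega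
      rcases eq_or_ne p.toNat 0 with h0 | h0
      · rw [hpn, h0] at hpre
        exact pv_match_zero_left q hq (by exact_mod_cast hpre)
      · rw [hpn] at hpre
        obtain ⟨j, hj, hpj⟩ := (pv_match_iff p.toNat q h0 hq).mp hpre
        have : pvToJ q p = some j := (pvToJ_eq_some_iff q hq p j).mpr ⟨hj, by rw [hpn, hpj]⟩
        rw [htj] at this
        simp at this
    rw [pvJStep, htj]
    exact ⟨by rw [pvStep]; simp [hvalid], hjo⟩
  | some jp =>
    obtain ⟨hjp, rfl⟩ := (pvToJ_eq_some_iff q hq p jp).mp htj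
    have hne : q / 10 ^ jp ≠ 0 := pv_div_pow_ne_zero q jp hjp hq
    have hvalid : pvIsValidPrefix (pvIntDigits ((q / 10 ^ jp : Nat) : Int)) (pvIntDigits (q : Int)) = true :=
      (pvIsValidPrefix_iff _ _).mpr ((pv_match_iff _ q hne hq).mpr ⟨jp, hjp, rfl⟩)
    have hlen : (pvIntDigits ((q / 10 ^ jp : Nat) : Int)).length = pvNumLen q - jp := by
      rw [pvIntDigits_len, pvNumLen_div_pow q jp hjp hq]
    rw [pvJStep, htj]
    cases jo with
    | none =>
      refine ⟨?_, by simpa using hjp⟩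
      rw [pvStep]
      simp only [pvEnc, hlen]
      rw [if_pos ⟨hvalid, by omega⟩]
    | some j =>
      have hjL : j < pvNumLen q := hjo j rfl
      by_cases hlt : jp < j
      · refine ⟨?_, by simp; omega⟩
        rw [pvStep]
        simp only [pvEnc, hlen]
        rw [if_pos ⟨hvalid, by omega⟩, min_eq_right (by omega)]
      · refine ⟨?_, by simp; omega⟩
        rw [pvStep]
        simp only [pvEnc, hlen]
        rw [if_neg (by intro h; omega), min_eq_left (by omega)]

theorem pvFold_enc (q : Nat) (hq : q ≠ 0) (ks : List Int) (hks : ∀ p ∈ ks, 0 ≤ p) :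
    ∀ jo : Option Nat, (∀ j ∈ jo, j < pvNumLen q) →
    ks.foldl (pvStep q) (pvEnc q jo) = pvEnc q (ks.foldl (pvJStep q) jo) := by
  induction ks with
  | nil => intro jo hjo; rfl
  | cons p ks ih =>
    intro jo hjo
    obtain ⟨h1, h2⟩ := pvStep_enc q hq p (hks p (by simp)) jo hjo
    rw [List.foldl_cons, List.foldl_cons, h1]
    exact ih (fun p hp => hks p (by simp [hp])) _ h2

theorem pvJFold_none_iff (q : Nat) (ks : List Int) : ∀ jo : Option Nat,
    ks.foldl (pvJStep q) jo = none ↔ (jo = none ∧ ∀ p ∈ ks, pvToJ q p = none) := by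
  induction ks with
  | nil => intro jo; simp
  | cons p ks ih =>
    intro jo
    rw [List.foldl_cons, ih]
    cases htj : pvToJ q p with
    | none =>
      simp only [pvJStep, htj]
      constructor
      · rintro ⟨h1, h2⟩
        exact ⟨h1, fun x hx => by rcases List.mem_cons.mp hx with rfl | hm; exacts [htj, h2 x hm]⟩
      · rintro ⟨h1, h2⟩
        exact ⟨h1, fun x hx => h2 x (by simp [hx])⟩
    | some jp =>
      simp only [pvJStep, htj]
      constructor
      · rintro ⟨h1, h2⟩
        cases jo <;> simp at h1
      · rintro ⟨h1, h2⟩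
        have := h2 p (by simp)
        rw [htj] at this
        simp at this

theorem pvJFold_some_exists (q : Nat) (ks : List Int) : ∀ (jo : Option Nat) (j : Nat),
    ks.foldl (pvJStep q) jo = some j → jo = some j ∨ ∃ p ∈ ks, pvToJ q p = some j := by
  induction ks with
  | nil => intro jo j h; exact Or.inl h
  | cons p ks ih =>
    intro jo j h
    rw [List.foldl_cons] at h
    rcases ih _ j h with h1 | ⟨p', hp', h2⟩
    · -- pvJStep q jo p = some j
      cases htj : pvToJ q p with
      | none => rw [pvJStep, htj] at h1; exact Or.inl h1
      | some jp =>
        rw [pvJStep, htj] at h1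
        cases jo with
        | none => simp at h1; exact Or.inr ⟨p, by simp, by rw [htj, h1]⟩
        | some j0 =>
          simp at h1
          rcases min_cases j0 jp with ⟨hmin, hle⟩ | ⟨hmin, hle⟩
          · exact Or.inl (by rw [← h1, hmin])
          · exact Or.inr ⟨p, by simp, by rw [htj, ← h1, hmin]⟩
    · exact Or.inr ⟨p', by simp [hp'], h2⟩

theorem pvJFold_min (q : Nat) (ks : List Int) : ∀ (jo : Option Nat) (j : Nat),
    ks.foldl (pvJStep q) jo = some j →
    (∀ j0 ∈ jo, j ≤ j0) ∧ (∀ p ∈ ks, ∀ jp, pvToJ q p = some jp → j ≤ jp) := by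
  induction ks with
  | nil =>
    intro jo j h
    simp only [List.foldl_nil] at h
    subst h
    exact ⟨fun j0 hj0 => by simp at hj0; omega, by simp⟩
  | cons p ks ih =>
    intro jo j h
    rw [List.foldl_cons] at h
    obtain ⟨h1, h2⟩ := ih _ j h
    cases htj : pvToJ q p with
    | none =>
      rw [pvJStep, htj] at h1
      refine ⟨h1, fun x hx jp hjp => ?_⟩
      rcases List.mem_cons.mp hx with rfl | hm
      · rw [htj] at hjp; simp at hjp
      · exact h2 x hm jp hjp
    | some jp0 =>
      have hmem2 : ∀ (x : Nat), pvJStep q jo p = some x → j ≤ x :=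
        fun x hx => h1 x (Option.mem_def.mpr hx)
      have hstep : ∀ j0 ∈ jo, j ≤ j0 := by
        intro j0 hj0
        cases jo with
        | none => simp at hj0
        | some j0' =>
          have hj0' : j0 = j0' := by simpa using hj0.symm
          subst hj0'
          have := hmem2 (min j0 jp0) (by simp [pvJStep, htj])
          omega
      have hjp0 : j ≤ jp0 := by
        cases jo with
        | none => exact hmem2 jp0 (by simp [pvJStep, htj])
        | some j0' =>
          have := hmem2 (min j0' jp0) (by simp [pvJStep, htj])
          omega
      refine ⟨hstep, fun x hx jp hjp => ?_⟩
      rcases List.mem_cons.mp hx with rfl | hm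
      · rw [htj] at hjp
        have : jp0 = jp := by simpa using hjp
        omega
      · exact h2 x hm jp hjp

theorem pvJFold_eq_find? (q : Nat) (hq : q ≠ 0) (ks : List Int) :
    ks.foldl (pvJStep q) none
      = (List.range (pvNumLen q)).find? (fun j => decide (((q / 10 ^ j : Nat) : Int) ∈ ks)) := by
  cases hf : (List.range (pvNumLen q)).find? (fun j => decide (((q / 10 ^ j : Nat) : Int) ∈ ks)) with
  | none =>
    have hnone := List.find?_eq_none.mp hf
    rw [pvJFold_none_iff]
    refine ⟨rfl, fun p hp => ?_⟩
    cases htj : pvToJ q p with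
    | none => rfl
    | some j =>
      obtain ⟨hj, rfl⟩ := (pvToJ_eq_some_iff q hq p j).mp htj
      have hthis := hnone j (List.mem_range.mpr hj)
      simp only [decide_eq_true_eq] at hthis
      exact absurd hp hthis
  | some j =>
    obtain ⟨hpred, hjL, hmin⟩ := pv_find?_range_min hf
    have hmem : ((q / 10 ^ j : Nat) : Int) ∈ ks := by simpa using hpred
    cases hr : ks.foldl (pvJStep q) none with
    | none =>
      obtain ⟨-, hall⟩ := (pvJFold_none_iff q ks none).mp hr
      have := hall _ hmem
      rw [(pvToJ_eq_some_iff q hq _ j).mpr ⟨hjL, rfl⟩] at this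
      exact absurd this (Option.some_ne_none j)
    | some j'' =>
      obtain ⟨-, hmin'⟩ := pvJFold_min q ks none j'' hr
      have hle : j'' ≤ j := hmin' _ hmem j ((pvToJ_eq_some_iff q hq _ j).mpr ⟨hjL, rfl⟩)
      rcases pvJFold_some_exists q ks none j'' hr with h | ⟨p, hp, htj⟩
      · simp at h
      · obtain ⟨hj''L, rfl⟩ := (pvToJ_eq_some_iff q hq p j'').mp htj
        by_cases hlt : j'' < j
        · have hfalse := hmin j'' hlt
          rw [decide_eq_false_iff_not] at hfalse
          exact absurd hp hfalse
        · have : j'' = j := by omega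
          rw [this]

theorem pv_mem_keys_update (ps : List (Int × Int)) : ∀ (d : PySem.Dict Int Int) (x : Int),
    x ∈ (d.update ps).keys ↔ x ∈ d.keys ∨ ∃ pr ∈ ps, pr.1 = x := by
  induction ps with
  | nil => intro d x; simp [PySem.Dict.update]
  | cons p ps ih =>
    intro d x
    have : d.update (p :: ps) = (d.insert p.1 p.2).update ps := rfl
    rw [this, ih, PySem.Dict.mem_keys_insert]
    constructor
    · rintro ((rfl | h) | h)
      · exact Or.inr ⟨p, by simp⟩
      · exact Or.inl h
      · obtain ⟨pr, hpr, rfl⟩ := h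
        exact Or.inr ⟨pr, by simp [hpr]⟩
    · rintro (h | ⟨pr, hpr, rfl⟩)
      · exact Or.inl (Or.inr h)
      · rcases List.mem_cons.mp hpr with rfl | h
        · exact Or.inl (Or.inl rfl)
        · exact Or.inr ⟨pr, h, rfl⟩

theorem pv_mem_keys_ofList (ps : List (Int × Int)) (x : Int) :
    x ∈ (PySem.Dict.ofList ps).keys ↔ ∃ pr ∈ ps, pr.1 = x := by
  rw [PySem.Dict.ofList, pv_mem_keys_update]
  simp [PySem.Dict.empty]

theorem pvBestPrefix_foldl_eq (q : Nat) (hq : q ≠ 0) (ks : List Int) (hks : ∀ p ∈ ks, 0 ≤ p) :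
    pvBestPrefix (pvIntDigits (q : Int)) ks = pvEnc q (ks.foldl (pvJStep q) none) := by
  exact pvFold_enc q hq ks hks none (by simp)

theorem pvGetIsSome_eq (d : PySem.Dict Int Int) (x : Int) :
    (d.get? x).isSome = decide (x ∈ d.keys) := by
  rw [← PySem.Dict.contains_eq_isSome_get?, PySem.Dict.contains_eq_decide_mem_keys]

theorem pv_op_eq (q : Nat) (hq : q ≠ 0) (l : List (Int × Int)) (name : String)
    (hks : ∀ pr ∈ l, 0 ≤ pr.1) (acc : List (Int × String × Int)) :
    (if (pvBestPrefix (pvIntDigits (q : Int)) (PySem.Dict.ofList l).keys).2 ≠ 0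
       then acc ++ [((PySem.Dict.ofList l).getD (pvBestPrefix (pvIntDigits (q : Int)) (PySem.Dict.ofList l).keys).2 0, name,
                     (pvBestPrefix (pvIntDigits (q : Int)) (PySem.Dict.ofList l).keys).2)]
       else acc)
    = match pvFirstMatch (PySem.Dict.ofList l) name (pvCandsB (q : Int)) with
      | some t => acc ++ [t]
      | none => acc := by
  have hkeys : ∀ p ∈ (PySem.Dict.ofList l).keys, 0 ≤ p := by
    intro p hp
    obtain ⟨pr, hpr, rfl⟩ := (pv_mem_keys_ofList l p).mp hp
    exact hks pr hpr
  have hL : max 1 (Nat.digits 10 q).length = pvNumLen q := rfl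
  rw [pvBestPrefix_foldl_eq q hq _ hkeys, pvCandsB_natCast q, hL, pvFirstMatch_map,
      pvJFold_eq_find? q hq]
  have hpred : (fun j => ((PySem.Dict.ofList l).get? (((q / 10 ^ j : Nat) : Int))).isSome)
      = (fun j => decide ((((q / 10 ^ j : Nat) : Int)) ∈ (PySem.Dict.ofList l).keys)) := by
    funext j; exact pvGetIsSome_eq _ _
  rw [hpred]
  cases hf : (List.range (pvNumLen q)).find?
      (fun j => decide ((((q / 10 ^ j : Nat) : Int)) ∈ (PySem.Dict.ofList l).keys)) with
  | none => simp [pvEnc]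
  | some j =>
    obtain ⟨hpj, hjL, -⟩ := pv_find?_range_min hf
    have hne : ((q / 10 ^ j : Nat) : Int) ≠ 0 := by
      have := pv_div_pow_ne_zero q j hjL hq
      exact_mod_cast this
    simp only [pvEnc, Option.map_some]
    rw [if_pos hne]

theorem pvValid_zero_false (p : Int) (hp : 0 ≤ p) (hp0 : p ≠ 0) :
    pvIsValidPrefix (pvIntDigits p) (pvIntDigits (0 : Int)) = false := by
  cases hb : pvIsValidPrefix (pvIntDigits p) (pvIntDigits (0 : Int)) with
  | false => rfl
  | true =>
    exfalso
    have hpre := (pvIsValidPrefix_iff _ _).mp hb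
    have hpn : p = ((p.toNat : Nat) : Int) := by omega
    rw [hpn] at hpre
    have := (pv_match_zero_right p.toNat).mp hpre
    omega

theorem pvBestPrefix_const (phd : List Int) (ks : List Int)
    (hall : ∀ p ∈ ks, pvIsValidPrefix (pvIntDigits p) phd = false) :
    pvBestPrefix phd ks = (0, 0) := by
  have : ∀ st : Nat × Int, ks.foldl (fun st p =>
      let pd := pvIntDigits p
      if pvIsValidPrefix pd phd = true ∧ st.1 < pd.length then (pd.length, p) else st) st = st := by
    induction ks with
    | nil => intro st; rfl
    | cons p ks ih =>
      intro st
      rw [List.foldl_cons]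
      have hv := hall p (by simp)
      rw [if_neg (by rw [hv]; simp)]
      exact ih (fun x hx => hall x (by simp [hx])) st
  exact this (0, 0)

theorem pv_op_zero (l : List (Int × Int)) (name : String)
    (hks : ∀ pr ∈ l, 0 ≤ pr.1) (hkey0 : ∀ pr ∈ l, pr.1 ≠ 0) (acc : List (Int × String × Int)) :
    (if (pvBestPrefix (pvIntDigits (0 : Int)) (PySem.Dict.ofList l).keys).2 ≠ 0
       then acc ++ [((PySem.Dict.ofList l).getD (pvBestPrefix (pvIntDigits (0 : Int)) (PySem.Dict.ofList l).keys).2 0, name,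
                     (pvBestPrefix (pvIntDigits (0 : Int)) (PySem.Dict.ofList l).keys).2)]
       else acc)
    = match pvFirstMatch (PySem.Dict.ofList l) name (pvCandsB (0 : Int)) with
      | some t => acc ++ [t]
      | none => acc := by
  have hbest : pvBestPrefix (pvIntDigits (0 : Int)) (PySem.Dict.ofList l).keys = (0, 0) := by
    apply pvBestPrefix_const
    intro p hp
    obtain ⟨pr, hpr, rfl⟩ := (pv_mem_keys_ofList l p).mp hp
    exact pvValid_zero_false pr.1 (hks pr hpr) (hkey0 pr hpr)
  have hcands : pvCandsB (0 : Int) = [0] := by decide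
  have hget : (PySem.Dict.ofList l).get? 0 = none := by
    rw [PySem.Dict.get?_eq_none_iff_not_mem_keys]
    intro hmem
    obtain ⟨pr, hpr, h0⟩ := (pv_mem_keys_ofList l 0).mp hmem
    exact hkey0 pr hpr h0
  rw [hbest, hcands]
  simp only [pvFirstMatch, hget]
  simp

theorem pv_main (phone : Int) (hph : 0 ≤ phone)
    (ops : List (String × (List (Int × Int))))
    (hops : ∀ op ∈ ops, ∀ pr ∈ op.2, 0 ≤ pr.1)
    (hnd : phone = 0 → ∀ op ∈ ops, ∀ pr ∈ op.2, pr.1 ≠ 0) :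
    find_corresponding_prefixes ops phone = find_corresponding_prefixes_alt ops phone := by
  have hpn : phone = ((phone.toNat : Nat) : Int) := by omega
  rw [find_corresponding_prefixes, find_corresponding_prefixes_alt]
  have main : ∀ (ops' : List (String × (List (Int × Int)))),
      (∀ op ∈ ops', ∀ pr ∈ op.2, 0 ≤ pr.1) →
      (phone = 0 → ∀ op ∈ ops', ∀ pr ∈ op.2, pr.1 ≠ 0) →
      ∀ acc : List (Int × String × Int),
      ops'.foldl (fun acc op =>
        let d : PySem.Dict Int Int := PySem.Dict.ofList op.2
        let best := pvBestPrefix (pvIntDigits phone) d.keys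
        if best.2 ≠ 0 then acc ++ [(d.getD best.2 0, op.1, best.2)] else acc) acc
      = ops'.foldl (fun acc op =>
        match pvFirstMatch (PySem.Dict.ofList op.2) op.1 (pvCandsB phone) with
        | some t => acc ++ [t]
        | none => acc) acc := by
    intro ops'
    induction ops' with
    | nil => intro _ _ acc; rfl
    | cons op ops' ih =>
      intro h1 h2 acc
      rw [List.foldl_cons, List.foldl_cons]
      have hop : (let d : PySem.Dict Int Int := PySem.Dict.ofList op.2
          let best := pvBestPrefix (pvIntDigits phone) d.keys
          if best.2 ≠ 0 then acc ++ [(d.getD best.2 0, op.1, best.2)] else acc)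
          = match pvFirstMatch (PySem.Dict.ofList op.2) op.1 (pvCandsB phone) with
            | some t => acc ++ [t]
            | none => acc := by
        rcases eq_or_ne phone.toNat 0 with h0 | h0
        · have hz : phone = 0 := by omega
          rw [hz]
          exact pv_op_zero op.2 op.1 (h1 op (by simp)) (h2 hz op (by simp)) acc
        · rw [hpn]
          exact pv_op_eq phone.toNat h0 op.2 op.1 (h1 op (by simp)) acc
      rw [hop]
      exact ih (fun o ho pr hpr => h1 o (by simp [ho]) pr hpr)
        (fun hz o ho pr hpr => h2 hz o (by simp [ho]) pr hpr) _
  exact main ops hops hnd []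

theorem pvBestPrefix_zero_snd (ks : List Int) (hks : ∀ p ∈ ks, 0 ≤ p) :
    (pvBestPrefix (pvIntDigits (0 : Int)) ks).2 = 0 := by
  have : ∀ st : Nat × Int, st.2 = 0 → st.1 ≤ 1 →
      ((ks.foldl (fun st p =>
        let pd := pvIntDigits p
        if pvIsValidPrefix pd (pvIntDigits (0 : Int)) = true ∧ st.1 < pd.length then (pd.length, p) else st) st).2 = 0
      ∧ (ks.foldl (fun st p =>
        let pd := pvIntDigits p
        if pvIsValidPrefix pd (pvIntDigits (0 : Int)) = true ∧ st.1 < pd.length then (pd.length, p) else st) st).1 ≤ 1) := by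
    induction ks with
    | nil => intro st h1 h2; exact ⟨h1, h2⟩
    | cons p ks ih =>
      intro st h1 h2
      rw [List.foldl_cons]
      rcases eq_or_ne p 0 with rfl | hp0
      · by_cases hc : pvIsValidPrefix (pvIntDigits 0) (pvIntDigits (0 : Int)) = true ∧ st.1 < (pvIntDigits 0).length
        · rw [if_pos hc]
          exact ih (fun x hx => hks x (by simp [hx])) _ rfl (by decide)
        · rw [if_neg hc]
          exact ih (fun x hx => hks x (by simp [hx])) st h1 h2
      · have hv := pvValid_zero_false p (hks p (by simp)) hp0
        rw [if_neg (by rw [hv]; simp)]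
        exact ih (fun x hx => hks x (by simp [hx])) st h1 h2
  exact (this (0, 0) rfl (by omega)).1

theorem pvA_zero_nil (ops : List (String × (List (Int × Int))))
    (hops : ∀ op ∈ ops, ∀ pr ∈ op.2, 0 ≤ pr.1) :
    find_corresponding_prefixes ops 0 = [] := by
  rw [find_corresponding_prefixes]
  have : ∀ (ops' : List (String × (List (Int × Int)))), (∀ op ∈ ops', ∀ pr ∈ op.2, 0 ≤ pr.1) →
      ∀ acc, ops'.foldl (fun acc op =>
        let d : PySem.Dict Int Int := PySem.Dict.ofList op.2
        let best := pvBestPrefix (pvIntDigits 0) d.keys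
        if best.2 ≠ 0 then acc ++ [(d.getD best.2 0, op.1, best.2)] else acc) acc = acc := by
    intro ops'
    induction ops' with
    | nil => intro _ acc; rfl
    | cons op ops' ih =>
      intro h1 acc
      rw [List.foldl_cons]
      have hb : (pvBestPrefix (pvIntDigits (0 : Int)) (PySem.Dict.ofList op.2).keys).2 = 0 := by
        apply pvBestPrefix_zero_snd
        intro p hp
        obtain ⟨pr, hpr, rfl⟩ := (pv_mem_keys_ofList op.2 p).mp hp
        exact h1 op (by simp) pr hpr
      simp only [hb]
      rw [if_neg (by simp)]
      exact ih (fun o ho pr hpr => h1 o (by simp [ho]) pr hpr) acc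
  exact this ops hops []

theorem pvB_acc_ne (ops : List (String × (List (Int × Int)))) (cands : List Int) :
    ∀ acc : List (Int × String × Int), acc ≠ [] →
    ops.foldl (fun acc op =>
      match pvFirstMatch (PySem.Dict.ofList op.2) op.1 cands with
      | some t => acc ++ [t]
      | none => acc) acc ≠ [] := by
  induction ops with
  | nil => intro acc h; exact h
  | cons op ops ih =>
    intro acc h
    rw [List.foldl_cons]
    cases hm : pvFirstMatch (PySem.Dict.ofList op.2) op.1 cands with
    | some t => exact ih _ (by simp)
    | none => exact ih _ h

theorem pvB_zero_ne (ops : List (String × (List (Int × Int))))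
    (hw : ∃ op ∈ ops, ∃ pr ∈ op.2, pr.1 = 0) :
    find_corresponding_prefixes_alt ops 0 ≠ [] := by
  rw [find_corresponding_prefixes_alt]
  have hcands : pvCandsB (0 : Int) = [0] := by decide
  have main : ∀ (ops' : List (String × (List (Int × Int)))),
      (∃ op ∈ ops', ∃ pr ∈ op.2, pr.1 = 0) → ∀ acc,
      ops'.foldl (fun acc op =>
        match pvFirstMatch (PySem.Dict.ofList op.2) op.1 (pvCandsB 0) with
        | some t => acc ++ [t]
        | none => acc) acc ≠ [] := by
    intro ops'
    induction ops' with
    | nil => rintro ⟨op, hop, -⟩; simp at hop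
    | cons op ops' ih =>
      rintro ⟨op', hop', pr, hpr, h0⟩ acc
      rw [List.foldl_cons]
      rcases List.mem_cons.mp hop' with rfl | hmem
      · have hk : (0 : Int) ∈ (PySem.Dict.ofList op'.2).keys :=
          (pv_mem_keys_ofList op'.2 0).mpr ⟨pr, hpr, h0⟩
        have hget : (PySem.Dict.ofList op'.2).get? 0 ≠ none := by
          intro hnone
          exact ((PySem.Dict.get?_eq_none_iff_not_mem_keys _ _).mp hnone) hk
        obtain ⟨v, hv⟩ := Option.ne_none_iff_exists'.mp hget
        rw [hcands]
        simp only [pvFirstMatch, hv]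
        exact pvB_acc_ne ops' (pvCandsB 0) _ (by simp)
      · cases hm : pvFirstMatch (PySem.Dict.ofList op.2) op.1 (pvCandsB 0) with
        | some t => exact ih ⟨op', hmem, pr, hpr, h0⟩ _
        | none => exact ih ⟨op', hmem, pr, hpr, h0⟩ _
  exact main ops hw []

theorem pv_tight_helper (ops : List (String × (List (Int × Int))))
    (hops : ∀ op ∈ ops, ∀ pr ∈ op.2, 0 ≤ pr.1)
    (hw : ∃ op ∈ ops, ∃ pr ∈ op.2, pr.1 = 0) :
    find_corresponding_prefixes ops 0 ≠ find_corresponding_prefixes_alt ops 0 := by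
  rw [pvA_zero_nil ops hops]
  intro h
  exact pvB_zero_ne ops hw h.symm

-- ===== VERDICT (by name: the statement is the Claim_ definition above) =====
theorem find_corresponding_prefixes_spec : Claim_unchanged_find_corresponding_prefixes := by
  intro ops phone hdom hpre hnd
  obtain ⟨hph, hops⟩ := hpre
  have hnd' : phone = 0 → ∀ op ∈ ops, ∀ pr ∈ op.2, pr.1 ≠ 0 := by
    intro hz op hop pr hpr h0
    refine hnd ?_
    exact ⟨hz, op, hop, pr, hpr, h0⟩
  exact pv_main phone hph ops (fun op hop pr hpr => (hops op hop pr hpr).1) hnd'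

theorem find_corresponding_prefixes_changed : Claim_changed_find_corresponding_prefixes := by
  unfold Claim_changed_find_corresponding_prefixes; decide

theorem find_corresponding_prefixes_tight : Claim_exact_find_corresponding_prefixes := by
  intro ops phone hdom hpre hd
  obtain ⟨hz, hw⟩ := hd
  obtain ⟨hph, hops⟩ := hpre
  subst hz
  exact pv_tight_helper ops (fun op hop pr hpr => (hops op hop pr hpr).1) hw
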